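-- pv_equiv track=rewrite | github.com/SeungjipLee/Algorithm | 장현욱/14주차/(2)연예인 월드컵.py | solution
-- ===== SOURCE A (Python) =====
-- def solution(N, M):
--     answer = []
--     world_cup = list(range(1, N+1))  # 연예인들 아이디 정렬 [1, 2, 3, ...]
--     how_beautiful = []  # 매력지수 기록
--
--     while len(world_cup) > 1:
--         now = []  # 이번 대진의 결과
--         for i in range(0, len(world_cup), 2):  # 두명씩 비교이므로 두칸씩
--             if i + 1 < len(world_cup):  # 마지막 번호의 짝이 있을때만
--                 if world_cup[i] == M:  # 우승자 M이 있다면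
--                     answer.append(world_cup[i+1])  # 우승자가 만난 연예인 기록
--                     now.append(M)  # 다음 진출조에 M 입력
--
--                 elif world_cup[i+1] == M:
--                     answer.append(world_cup[i])
--                     now.append(M)
--
--                 else:  # 숫자끼리의 경우
--                     now.append(min(world_cup[i], world_cup[i+1]))
--
--
--             else:
--                 now.append(world_cup[i])  # 부전승 처리
--
--         world_cup = now  # 나온 결과표를 다시 새로운 대진표로 형성
--     return answer
-- ===== SOURCE B (Python) =====
-- def solution(N, M):
--     answer = []
--     if M < 1 or M > N:
--         return answer
--     p = M - 1
--     size = 1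
--     while size < N:
--         b = p // size
--         sib = b + 1 if b % 2 == 0 else b - 1
--         start = sib * size
--         if start < N:
--             answer.append(start + 1)
--         size *= 2
--     return answer
-- ===== Notes on version B (the rewrite author's own statement) =====
-- stated objective: faster
-- what changed: Instead of simulating the whole N-player bracket round by round, B walks only M's path: in each round M's sibling block's survivor is that block's smallest id, computed in closed form from M's block index.
import Mathlib
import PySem

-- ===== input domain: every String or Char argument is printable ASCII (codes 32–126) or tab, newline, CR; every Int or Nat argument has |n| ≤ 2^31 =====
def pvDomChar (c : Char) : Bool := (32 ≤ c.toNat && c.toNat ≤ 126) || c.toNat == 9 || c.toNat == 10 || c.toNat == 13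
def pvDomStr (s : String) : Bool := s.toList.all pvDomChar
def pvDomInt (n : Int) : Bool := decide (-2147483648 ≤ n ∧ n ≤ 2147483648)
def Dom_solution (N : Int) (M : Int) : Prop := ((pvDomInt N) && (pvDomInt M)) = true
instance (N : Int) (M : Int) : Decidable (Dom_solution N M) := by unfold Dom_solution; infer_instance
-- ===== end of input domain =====

-- B replaces the full round-by-round tournament simulation by walking only M's bracket:
-- each round, M's sibling block's survivor is that block's smallest id, computed in closed form.

-- ===== PORT A =====
-- one round of A's inner 'for i in range(0, len, 2)' loop: returns (now, opponents recorded this round)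
def roundStep (M : Int) : List Int → List Int × List Int
  | [] => ([], [])
  | [x] => ([x], [])
  | a :: b :: rest =>
      let r := roundStep M rest
      if a = M then (M :: r.1, b :: r.2)
      else if b = M then (M :: r.1, a :: r.2)
      else (min a b :: r.1, r.2)

-- A's 'while len(world_cup) > 1' loop. 'fuel' is a totality guard only: each round more than
-- halves the list, so the initial list length (passed by 'solution') bounds the number of rounds.
def loopA (M : Int) (fuel : Nat) (wc : List Int) (answer : List Int) : List Int :=
  match fuel with
  | 0 => answer
  | fuel + 1 =>
    if wc.length > 1 then
      let r := roundStep M wc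
      loopA M fuel r.1 (answer ++ r.2)
    else answer

def solution (N : Int) (M : Int) : List Int :=
  let world_cup := PySem.List.pyRange 1 (N + 1) 1
  loopA M world_cup.length world_cup []

-- ===== PORT B =====
-- Source B's 'while size < N' loop. 'fuel' is a totality guard only: size doubles from 1 each
-- round and 2^k > k, so N.toNat (passed by 'solution_alt') bounds the number of rounds.
def loopB (N M p size : Int) (fuel : Nat) (answer : List Int) : List Int :=
  match fuel with
  | 0 => answer
  | fuel + 1 =>
    if size < N then
      let b := PySem.Int.floordiv p size
      let sib := if PySem.Int.mod b 2 = 0 then b + 1 else b - 1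
      let start := sib * size
      let answer' := if start < N then answer ++ [start + 1] else answer
      loopB N M p (size * 2) fuel answer'
    else answer

def solution_alt (N : Int) (M : Int) : List Int :=
  if M < 1 ∨ M > N then []
  else loopB N M (M - 1) 1 N.toNat []

-- ===== PRECONDITION & SPEC =====
def Spec_solution (N : Int) (M : Int) (out : List Int) : Prop := out = solution_alt N M
instance (N : Int) (M : Int) (out : List Int) : Decidable (Spec_solution N M out) := by unfold Spec_solution; infer_instance

-- ===== CLAIM (what is proved, stated in full; the proofs are below) =====
def Claim_equal_solution : Prop := ∀ (N : Int) (M : Int), Dom_solution N M → Spec_solution N M (solution N M)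

-- ===== LEMMAS AND PROOFS =====

-- representative of block b when blocks have size s and seed M = p+1 sits at 0-based slot p
def repf (p s : Nat) : Nat → Int :=
  fun b => if b = p / s then (p : Int) + 1 else ((b * s : Nat) : Int) + 1

-- bracket state once blocks have size s: one representative per block
def blocks (n p s : Nat) : List Int :=
  (List.range ((n + s - 1) / s)).map (repf p s)

theorem range_map_cons2 {α : Type} (f : Nat → α) (m : Nat) :
    (List.range (m + 2)).map f = f 0 :: f 1 :: (List.range m).map (fun k => f (k + 2)) := by
  rw [List.range_succ_eq_map, List.range_succ_eq_map]
  simp only [List.map_cons, List.map_map, Function.comp_def]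

theorem roundStep_cons2 (M a b : Int) (rest : List Int) :
    roundStep M (a :: b :: rest) =
    ((if a = M then M else if b = M then M else min a b) :: (roundStep M rest).1,
     (if a = M then [b] else if b = M then [a] else []) ++ (roundStep M rest).2) := by
  simp only [roundStep]
  split_ifs <;> simp

-- generic shape of one round on an indexed list
theorem roundStep_map_range (M : Int) (m : Nat) (f : Nat → Int) :
    roundStep M ((List.range m).map f) =
    ((List.range ((m + 1) / 2)).map (fun k =>
        if 2 * k + 1 < m then
          (if f (2 * k) = M then M
           else if f (2 * k + 1) = M then M
           else min (f (2 * k)) (f (2 * k + 1)))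
        else f (2 * k)),
     (List.range (m / 2)).flatMap (fun k =>
        if f (2 * k) = M then [f (2 * k + 1)]
        else if f (2 * k + 1) = M then [f (2 * k)]
        else [])) := by
  induction m using Nat.strong_induction_on generalizing f with
  | _ m ih =>
    rcases m with _ | _ | m
    · simp [roundStep]
    · simp [roundStep]
    · have hm2 : m + 1 + 1 = m + 2 := rfl
      rw [hm2, range_map_cons2 f m, roundStep_cons2, ih m (by omega) (fun k => f (k + 2))]
      have e1 : (m + 2 + 1) / 2 = (m + 1) / 2 + 1 := by omega
      have e2 : (m + 2) / 2 = m / 2 + 1 := by omega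
      rw [e1, e2, List.range_succ_eq_map, List.range_succ_eq_map, List.map_cons,
          List.flatMap_cons, List.map_map, List.flatMap_map]
      dsimp only
      refine congrArg₂ Prod.mk (congrArg₂ List.cons ?_ ?_) (congrArg₂ (· ++ ·) ?_ ?_)
      · simp only [Nat.mul_zero, Nat.zero_add]
        rw [if_pos (show (1 : Nat) < m + 2 by omega)]
      · apply List.map_congr_left
        intro k _
        simp only [Function.comp_def]
        have i1 : 2 * (k + 1) = 2 * k + 2 := by ring
        rw [i1]
        have i2 : 2 * k + 2 + 1 = 2 * k + 1 + 2 := by ring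
        rw [i2]
        simp only [Nat.add_lt_add_iff_right]
      · simp only [Nat.mul_zero, Nat.zero_add]
      · refine congrArg (fun g => List.flatMap g (List.range (m / 2))) (funext fun k => ?_)
        have i1 : 2 * (k + 1) = 2 * k + 2 := by ring
        rw [i1]

theorem flatMap_single (h : Nat → List Int) (k0 t : Nat) (hz : ∀ k, k ≠ k0 → h k = []) :
    (List.range t).flatMap h = if k0 < t then h k0 else [] := by
  induction t with
  | zero => simp
  | succ t ih =>
    rw [List.range_succ, List.flatMap_append, ih]
    simp only [List.flatMap_cons, List.flatMap_nil, List.append_nil]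
    by_cases hk : k0 = t
    · subst hk
      rw [if_neg (by omega), if_pos (by omega)]
      simp
    · rw [hz t (fun he => hk he.symm), List.append_nil]
      simp only [show (k0 < t + 1) ↔ k0 < t from by omega]

theorem ceil_eq (n s : Nat) (hs : 0 < s) (hn : 0 < n) : (n + s - 1) / s = (n - 1) / s + 1 := by
  rw [show n + s - 1 = (n - 1) + s from by omega, Nat.add_div_right _ hs]

theorem lt_ceil_iff (n s b : Nat) (hs : 0 < s) (hn : 0 < n) : b < (n + s - 1) / s ↔ b * s < n := by
  rw [ceil_eq n s hs hn, Nat.lt_succ_iff, Nat.le_div_iff_mul_le hs]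
  omega

theorem repf_eq_iff (p s b : Nat) (hs : 0 < s) : repf p s b = (p : Int) + 1 ↔ b = p / s := by
  unfold repf
  split_ifs with h
  · simp [h]
  · refine iff_of_false ?_ h
    intro he
    have hbs : b * s = p := by exact_mod_cast add_right_cancel he
    exact h (by rw [← hbs, Nat.mul_div_cancel _ hs])

-- one round on the abstract bracket
theorem roundStep_blocks (n p s : Nat) (hs : 0 < s) (hp : p < n) (hsn : s < n) :
    roundStep ((p : Int) + 1) (blocks n p s) =
    (blocks n p (2 * s),
     if (if p / s % 2 = 0 then p / s + 1 else p / s - 1) * s < n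
     then [(((if p / s % 2 = 0 then p / s + 1 else p / s - 1) * s : Nat) : Int) + 1]
     else []) := by
  have hn : 0 < n := by omega
  have h2s : 0 < 2 * s := by omega
  have hlt : ∀ b : Nat, b < (n + s - 1) / s ↔ b * s < n := fun b => lt_ceil_iff n s b hs hn
  have hlt2 : ∀ b : Nat, b < (n + 2 * s - 1) / (2 * s) ↔ b * (2 * s) < n :=
    fun b => lt_ceil_iff n (2 * s) b h2s hn
  have hdd : p / s / 2 = p / (2 * s) := by rw [Nat.div_div_eq_div_mul, Nat.mul_comm]
  have hqs : p / s * s ≤ p := Nat.div_mul_le_self p s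
  have hps : p < (p / s + 1) * s := by
    have h1 := Nat.div_add_mod p s
    have h2 := Nat.mod_lt p hs
    have h3 : (p / s + 1) * s = s * (p / s) + s := by ring
    omega
  have hqlt : p / s < (n + s - 1) / s := (hlt _).mpr (by omega)
  unfold blocks
  rw [roundStep_map_range]
  have hcnt : ((n + s - 1) / s + 1) / 2 = (n + 2 * s - 1) / (2 * s) := by
    rw [ceil_eq n s hs hn, ceil_eq n (2 * s) h2s hn,
        show (n - 1) / s + 1 + 1 = (n - 1) / s + 2 from rfl,
        Nat.add_div_right _ (by norm_num : (0 : Nat) < 2), Nat.div_div_eq_div_mul,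
        Nat.mul_comm s 2]
  refine congrArg₂ Prod.mk ?_ ?_
  · rw [hcnt]
    apply List.map_congr_left
    intro k hk
    rw [List.mem_range] at hk
    have hk2 : k * (2 * s) < n := (hlt2 k).mp hk
    by_cases hpair : 2 * k + 1 < (n + s - 1) / s
    · rw [if_pos hpair]
      by_cases h1 : 2 * k = p / s
      · rw [if_pos ((repf_eq_iff p s (2 * k) hs).mpr h1)]
        have hkq : k = p / (2 * s) := by omega
        simp [repf, hkq]
      · rw [if_neg (by rw [repf_eq_iff p s (2 * k) hs]; exact h1)]
        by_cases h2 : 2 * k + 1 = p / s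
        · rw [if_pos ((repf_eq_iff p s (2 * k + 1) hs).mpr h2)]
          have hkq : k = p / (2 * s) := by omega
          simp [repf, hkq]
        · rw [if_neg (by rw [repf_eq_iff p s (2 * k + 1) hs]; exact h2)]
          have hk2s : k ≠ p / (2 * s) := by omega
          unfold repf
          rw [if_neg h1, if_neg h2, if_neg hk2s]
          have hmle : 2 * k * s ≤ (2 * k + 1) * s := mul_le_mul_right' (by omega) s
          have hmin : ((2 * k * s : Nat) : Int) + 1 ≤ (((2 * k + 1) * s : Nat) : Int) + 1 := by
            omega
          rw [min_eq_left hmin, show 2 * k * s = k * (2 * s) from by ring]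
    · rw [if_neg hpair]
      have hklt : 2 * k < (n + s - 1) / s :=
        (hlt _).mpr (by rw [show 2 * k * s = k * (2 * s) from by ring]; exact hk2)
      have hq_le : p / s ≤ 2 * k := by omega
      by_cases h1 : 2 * k = p / s
      · have hkq : k = p / (2 * s) := by omega
        unfold repf
        rw [if_pos h1, if_pos hkq]
      · have hk2s : k ≠ p / (2 * s) := by omega
        unfold repf
        rw [if_neg h1, if_neg hk2s, show 2 * k * s = k * (2 * s) from by ring]
  · have hz : ∀ k, k ≠ p / s / 2 →
        (if repf p s (2 * k) = (p : Int) + 1 then [repf p s (2 * k + 1)]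
         else if repf p s (2 * k + 1) = (p : Int) + 1 then [repf p s (2 * k)] else []) = [] := by
      intro k hk
      rw [if_neg (by rw [repf_eq_iff p s (2 * k) hs]; omega),
          if_neg (by rw [repf_eq_iff p s (2 * k + 1) hs]; omega)]
    rw [flatMap_single (fun k =>
        if repf p s (2 * k) = (p : Int) + 1 then [repf p s (2 * k + 1)]
        else if repf p s (2 * k + 1) = (p : Int) + 1 then [repf p s (2 * k)] else [])
        (p / s / 2) _ hz]
    by_cases hqe : p / s % 2 = 0
    · rw [if_pos hqe]
      have h2q : 2 * (p / s / 2) = p / s := by omega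
      have hcond : (p / s / 2 < (n + s - 1) / s / 2) ↔ (p / s + 1) * s < n := by
        rw [← hlt (p / s + 1)]
        omega
      by_cases hc : (p / s + 1) * s < n
      · rw [if_pos (hcond.mpr hc), if_pos hc,
            if_pos ((repf_eq_iff p s _ hs).mpr h2q), h2q]
        unfold repf
        rw [if_neg (by omega)]
      · rw [if_neg (fun hh => hc (hcond.mp hh)), if_neg hc]
    · rw [if_neg hqe]
      have hqodd : p / s % 2 = 1 := by omega
      have h2q : 2 * (p / s / 2) = p / s - 1 := by omega
      have h2q1 : 2 * (p / s / 2) + 1 = p / s := by omega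
      have hsmall : (p / s - 1) * s < n := by
        have hmle : (p / s - 1) * s ≤ p / s * s := mul_le_mul_right' (by omega) s
        omega
      have hcc : p / s / 2 < (n + s - 1) / s / 2 := by omega
      rw [if_pos hcc, if_pos hsmall,
          if_neg (by rw [repf_eq_iff p s _ hs]; omega),
          if_pos ((repf_eq_iff p s _ hs).mpr h2q1), h2q]
      unfold repf
      rw [if_neg (by omega)]

theorem loopA_succ (M : Int) (fuel : Nat) (wc acc : List Int) :
    loopA M (fuel + 1) wc acc =
      if wc.length > 1 then loopA M fuel (roundStep M wc).1 (acc ++ (roundStep M wc).2)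
      else acc := rfl

theorem loopB_succ (N M p size : Int) (fuel : Nat) (acc : List Int) :
    loopB N M p size (fuel + 1) acc =
      if size < N then
        loopB N M p (size * 2) fuel
          (if (if PySem.Int.mod (PySem.Int.floordiv p size) 2 = 0
               then PySem.Int.floordiv p size + 1 else PySem.Int.floordiv p size - 1) * size < N
           then acc ++ [(if PySem.Int.mod (PySem.Int.floordiv p size) 2 = 0
               then PySem.Int.floordiv p size + 1 else PySem.Int.floordiv p size - 1) * size + 1]
           else acc)
      else acc := rfl

-- the two loops agree on the abstract bracket
theorem loop_eq (n p : Nat) (hp : p < n) (fuel : Nat) (s : Nat) (hs : 0 < s) (acc : List Int) :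
    loopA ((p : Int) + 1) fuel (blocks n p s) acc
      = loopB (n : Int) ((p : Int) + 1) (p : Int) (s : Int) fuel acc := by
  induction fuel generalizing s acc with
  | zero => rfl
  | succ fuel ih =>
    by_cases hsn : s < n
    · have hn : 0 < n := by omega
      have hA : (blocks n p s).length > 1 := by
        simp only [blocks, List.length_map, List.length_range]
        have := (lt_ceil_iff n s 1 hs hn).mpr (by omega)
        omega
      have hB : (s : Int) < (n : Int) := by omega
      rw [loopA_succ, loopB_succ, if_pos hA, if_pos hB,
          roundStep_blocks n p s hs hp hsn]
      dsimp only
      have hfd : PySem.Int.floordiv (p : Int) (s : Int) = ((p / s : Nat) : Int) :=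
        PySem.Int.floordiv_natCast p s
      have hmod2 : PySem.Int.mod ((p / s : Nat) : Int) 2 = ((p / s % 2 : Nat) : Int) := by
        rw [show (2 : Int) = ((2 : Nat) : Int) from rfl]
        exact PySem.Int.mod_natCast _ 2
      rw [hfd, hmod2]
      have hsz : ((s : Int)) * 2 = ((2 * s : Nat) : Int) := by push_cast; ring
      by_cases hqe : p / s % 2 = 0
      · rw [if_pos hqe, if_pos (show ((p / s % 2 : Nat) : Int) = 0 by exact_mod_cast hqe)]
        have hcast : (((p / s : Nat) : Int) + 1) * (s : Int)
            = (((p / s + 1) * s : Nat) : Int) := by push_cast; ring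
        rw [hcast]
        by_cases hc : (p / s + 1) * s < n
        · rw [if_pos hc, if_pos (show ((((p / s + 1) * s : Nat)) : Int) < (n : Int) by omega)]
          rw [hsz]
          exact ih (2 * s) (by omega) _
        · rw [if_neg hc, if_neg (show ¬ ((((p / s + 1) * s : Nat)) : Int) < (n : Int) by omega),
              List.append_nil]
          rw [hsz]
          exact ih (2 * s) (by omega) _
      · rw [if_neg hqe, if_neg (show ¬ ((p / s % 2 : Nat) : Int) = 0 by exact_mod_cast hqe)]
        have hq1 : 1 ≤ p / s := by
          rcases Nat.eq_zero_or_pos (p / s) with h0 | h0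
          · exact absurd (by simp [h0]) hqe
          · exact h0
        have hcast : (((p / s : Nat) : Int) - 1) * (s : Int)
            = (((p / s - 1) * s : Nat) : Int) := by
          have : ((p / s : Nat) : Int) - 1 = ((p / s - 1 : Nat) : Int) := by omega
          rw [this]; push_cast; ring
        rw [hcast]
        by_cases hc : (p / s - 1) * s < n
        · rw [if_pos hc, if_pos (show ((((p / s - 1) * s : Nat)) : Int) < (n : Int) by omega)]
          rw [hsz]
          exact ih (2 * s) (by omega) _
        · rw [if_neg hc, if_neg (show ¬ ((((p / s - 1) * s : Nat)) : Int) < (n : Int) by omega),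
              List.append_nil]
          rw [hsz]
          exact ih (2 * s) (by omega) _
    · have hA : ¬ (blocks n p s).length > 1 := by
        simp only [blocks, List.length_map, List.length_range]
        have : (n + s - 1) / s < 2 := by
          rw [Nat.div_lt_iff_lt_mul hs]; omega
        omega
      have hB : ¬ (s : Int) < (n : Int) := by omega
      rw [loopA_succ, loopB_succ, if_neg hA, if_neg hB]

-- when M never appears, A records nothing
theorem roundStep_noM (M : Int) : ∀ (wc : List Int), M ∉ wc →
    (roundStep M wc).2 = [] ∧ ∀ x ∈ (roundStep M wc).1, x ∈ wc
  | [] => by simp [roundStep]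
  | [x] => by simp [roundStep]
  | a :: b :: rest => by
    intro h
    have hna : ¬ a = M := fun he => h (by simp [he])
    have hnb : ¬ b = M := fun he => h (by simp [he])
    have ih := roundStep_noM M rest (fun hx => h (by simp [hx]))
    simp only [roundStep, if_neg hna, if_neg hnb]
    refine ⟨ih.1, ?_⟩
    intro x hx
    simp only [List.mem_cons] at hx ⊢
    rcases hx with hx | hx
    · rcases le_total a b with hab | hab
      · left; rw [hx]; exact min_eq_left hab
      · right; left; rw [hx]; exact min_eq_right hab
    · right; right; exact ih.2 x hx

theorem loopA_noM (M : Int) (fuel : Nat) : ∀ (wc acc : List Int), M ∉ wc →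
    loopA M fuel wc acc = acc := by
  induction fuel with
  | zero => intro wc acc _; rfl
  | succ fuel ih =>
    intro wc acc h
    by_cases hl : wc.length > 1
    · obtain ⟨h2, hsub⟩ := roundStep_noM M wc h
      rw [loopA_succ, if_pos hl, h2, List.append_nil]
      exact ih _ acc (fun hx => h (hsub _ hx))
    · rw [loopA_succ, if_neg hl]

theorem pyRange_eq_blocks (N : Int) (hN : 1 ≤ N) (p : Nat) :
    PySem.List.pyRange 1 (N + 1) 1 = blocks N.toNat p 1 := by
  rw [PySem.List.pyRange_one]
  unfold blocks repf
  rw [show (N + 1 - 1).toNat = N.toNat from by omega,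
      show (N.toNat + 1 - 1) / 1 = N.toNat from by omega]
  apply List.map_congr_left
  intro k _
  simp only [Nat.div_one, Nat.mul_one]
  split_ifs with h <;> omega

-- ===== VERDICT (by name: the statement is the Claim_ definition above) =====
theorem solution_spec : Claim_equal_solution := by
  intro N M _
  show solution N M = solution_alt N M
  unfold solution solution_alt
  by_cases hM : M < 1 ∨ M > N
  · rw [if_pos hM]
    show loopA M (PySem.List.pyRange 1 (N + 1) 1).length (PySem.List.pyRange 1 (N + 1) 1) [] = []
    apply loopA_noM
    intro hmem
    rw [PySem.List.mem_pyRange_one] at hmem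
    omega
  · rw [if_neg hM]
    have hM1 : 1 ≤ M := by omega
    have hN : 1 ≤ N := by omega
    set p : Nat := (M - 1).toNat with hpdef
    have hMp : M = (p : Int) + 1 := by omega
    have hp : p < N.toNat := by omega
    rw [pyRange_eq_blocks N hN p, hMp,
        show (p : Int) + 1 - 1 = (p : Int) from by ring]
    show loopA ((p : Int) + 1) (blocks N.toNat p 1).length (blocks N.toNat p 1) []
        = loopB N ((p : Int) + 1) (p : Int) 1 N.toNat []
    have hlen : (blocks N.toNat p 1).length = N.toNat := by
      simp only [blocks, List.length_map, List.length_range]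
      omega
    rw [hlen]
    have h1 := loop_eq N.toNat p hp N.toNat 1 Nat.one_pos []
    rw [show ((N.toNat : Nat) : Int) = N from by omega] at h1
    simpa using h1
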